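-- pv_equiv track=rewrite | github.com/Rifa-Tasfiya/CSE220-Assignments- | Array/linearArray.py | do_split
-- ===== SOURCE A (Python) =====
-- def do_split(source):
--     total_1 = 0
--     total_2 = 0
--     size = len(source)
--     split_checker = False
--     for i in range(0, size-1):
--         total_1 += source[i]
--         for j in range(i+1, size):
--             total_2 += source[j]
--         if total_1 == total_2:
--             split_checker = True
--         total_2 = 0
--     return split_checker
-- ===== SOURCE B (Python) =====
-- def do_split(source):
--     total = sum(source)
--     prefix = 0
--     for x in source[:-1]:
--         prefix += x
--         if prefix * 2 == total:
--             return True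
--     return False
-- ===== Notes on version B (the rewrite author's own statement) =====
-- stated objective: faster
-- what changed: Replaces A's nested loops (recomputing the suffix sum for every split point) with one total sum and a single pass comparing twice the running prefix to the total, with early exit.
import Mathlib
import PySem

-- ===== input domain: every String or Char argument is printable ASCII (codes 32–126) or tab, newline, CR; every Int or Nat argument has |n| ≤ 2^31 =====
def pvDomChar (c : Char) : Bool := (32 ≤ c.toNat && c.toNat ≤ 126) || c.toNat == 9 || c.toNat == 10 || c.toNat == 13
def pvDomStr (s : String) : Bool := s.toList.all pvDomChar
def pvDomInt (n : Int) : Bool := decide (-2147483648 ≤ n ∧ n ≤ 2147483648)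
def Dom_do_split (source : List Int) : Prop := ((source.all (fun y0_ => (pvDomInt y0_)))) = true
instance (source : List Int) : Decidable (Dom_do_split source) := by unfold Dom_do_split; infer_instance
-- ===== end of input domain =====

-- B replaces A's nested loops with one total sum and a single early-exit pass (O(n) instead of O(n^2)).

-- ===== PORT A =====
-- literal port of A: outer loop over range(0, size-1), inner loop recomputing the suffix sum
def do_split (source : List Int) : Bool :=
  let size : Int := PySem.List.len source
  let r :=
    (PySem.List.pyRange 0 (size - 1) 1).foldl
      (fun (st : Int × Bool) i =>
        let total_1 := st.1 + PySem.List.pyGetD source i 0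
        let total_2 :=
          (PySem.List.pyRange (i + 1) size 1).foldl
            (fun t j => t + PySem.List.pyGetD source j 0) 0
        (total_1, if total_1 == total_2 then true else st.2))
      (0, false)
  r.2

-- ===== PORT B =====
-- early-return loop of Source B over source[:-1], carrying the running prefix
def doSplitLoop (total : Int) (pre : Int) : List Int → Bool
  | [] => false
  | x :: xs =>
    let p := pre + x
    if p * 2 == total then true else doSplitLoop total p xs

def do_split_alt (source : List Int) : Bool :=
  doSplitLoop source.sum 0 source.dropLast

-- ===== PRECONDITION & SPEC =====
def Spec_do_split (source : List Int) (out : Bool) : Prop := out = do_split_alt source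
instance (source : List Int) (out : Bool) : Decidable (Spec_do_split source out) := by unfold Spec_do_split; infer_instance

-- ===== CLAIM (what is proved, stated in full; the proofs are below) =====
def Claim_equal_do_split : Prop := ∀ (source : List Int), Dom_do_split source → Spec_do_split source (do_split source)

-- ===== LEMMAS AND PROOFS =====

theorem anyCongr {a : Type} (l : List a) (f g : a → Bool)
    (h : ∀ x ∈ l, f x = g x) : l.any f = l.any g := by
  induction l with
  | nil => rfl
  | cons x t ih =>
    simp only [List.any_cons, h x (by simp), ih (fun y hy => h y (by simp [hy]))]

-- B's loop returns true iff some proper prefix of xs (extended by pre) doubles to total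
theorem doSplitLoop_char (total : Int) (xs : List Int) (pre : Int) :
    doSplitLoop total pre xs =
      (List.range xs.length).any (fun k => (pre + (xs.take (k + 1)).sum) * 2 == total) := by
  induction xs generalizing pre with
  | nil => simp [doSplitLoop]
  | cons x t ih =>
    simp only [doSplitLoop]
    by_cases h : (pre + x) * 2 = total
    · rw [if_pos (by simpa using h)]
      symm
      rw [List.any_eq_true]
      exact ⟨0, by simp, by simp [h]⟩
    · rw [if_neg (by simpa using h), ih (pre + x)]
      rw [List.length_cons, List.range_succ_eq_map, List.any_cons]
      have h0 : ((pre + ((x :: t).take (0 + 1)).sum) * 2 == total) = false := by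
        simp [h]
      rw [h0, Bool.false_or, List.any_map]
      apply anyCongr
      intro k _
      simp [Function.comp, add_assoc]

-- the inner A loop computes the suffix sum
theorem innerSum (source : List Int) (k : Nat) :
    (PySem.List.pyRange ((k : Int) + 1) ((source.length : Int)) 1).foldl
        (fun t j => t + PySem.List.pyGetD source j 0) 0
      = (source.drop (k + 1)).sum := by
  rw [PySem.List.foldl_pyRange_pyGetD' source 0 (fun t v => t + v) 0]
  · have h1 : ((k : Int) + 1).toNat = k + 1 := by omega
    rw [h1]
    exact List.sum_eq_foldl.symm
  · positivity

-- the outer A loop: running prefix sum and the 'some split so far' flag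
theorem outerChar (source : List Int) (n : Nat) (hn : n ≤ source.length) :
    (List.range n).foldl
      (fun (st : Int × Bool) (k : Nat) =>
        (st.1 + PySem.List.pyGetD source (k : Int) 0,
         if st.1 + PySem.List.pyGetD source (k : Int) 0 ==
              (PySem.List.pyRange ((k : Int) + 1) ((source.length : Int)) 1).foldl
                (fun t j => t + PySem.List.pyGetD source j 0) 0
         then true else st.2))
      (0, false)
    = ((source.take n).sum,
       (List.range n).any
         (fun k => (source.take (k + 1)).sum == (source.drop (k + 1)).sum)) := by
  induction n with
  | zero => simp
  | succ m ih =>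
    rw [List.range_succ, List.foldl_append, List.any_append, ih (by omega)]
    have hget : PySem.List.pyGetD source ((m : Nat) : Int) 0 = source.getD m 0 :=
      PySem.List.pyGetD_natCast source m 0
    have hm : m < source.length := by omega
    have htake : (source.take m).sum + source.getD m 0 = (source.take (m + 1)).sum := by
      rw [List.getD_eq_getElem source 0 hm, List.take_add_one, List.sum_append]
      simp [hm]
    simp only [List.foldl_cons, List.foldl_nil, innerSum source m, hget, htake,
      List.any_cons, List.any_nil, Bool.or_false]
    by_cases h : (source.take (m + 1)).sum = (source.drop (m + 1)).sum
    · simp [h]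
    · simp [h, Bool.or_comm]

theorem aChar (source : List Int) :
    do_split source =
      (List.range (source.length - 1)).any
        (fun k => (source.take (k + 1)).sum == (source.drop (k + 1)).sum) := by
  unfold do_split
  simp only [PySem.List.len_eq]
  rw [PySem.List.pyRange_one]
  have htn : ((source.length : Int) - 1 - 0).toNat = source.length - 1 := by omega
  rw [htn, List.foldl_map]
  have h := outerChar source (source.length - 1) (by omega)
  simp only [zero_add]
  rw [h]

theorem bChar (source : List Int) :
    do_split_alt source =
      (List.range (source.length - 1)).any
        (fun k => ((source.take (k + 1)).sum) * 2 == source.sum) := by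
  unfold do_split_alt
  rw [doSplitLoop_char, List.length_dropLast]
  apply anyCongr
  intro k hk
  rw [List.mem_range] at hk
  have h : (source.dropLast.take (k + 1)) = source.take (k + 1) := by
    rw [List.dropLast_eq_take, List.take_take]
    congr 1
    omega
  simp [h]

theorem keyIff (source : List Int) (k : Nat) :
    ((source.take (k + 1)).sum == (source.drop (k + 1)).sum)
      = (((source.take (k + 1)).sum) * 2 == source.sum) := by
  have h : (source.take (k + 1)).sum + (source.drop (k + 1)).sum = source.sum := by
    rw [← List.sum_append, List.take_append_drop]
  by_cases he : (source.take (k + 1)).sum = (source.drop (k + 1)).sum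
  · have h2 : (source.drop (k + 1)).sum * 2 = source.sum := by omega
    simp [he, h2]
  · have : ¬ (source.take (k + 1)).sum * 2 = source.sum := by omega
    simp [he, this]

-- ===== VERDICT (by name: the statement is the Claim_ definition above) =====
theorem do_split_spec : Claim_equal_do_split := by
  intro source _
  unfold Spec_do_split
  rw [aChar, bChar]
  exact anyCongr _ _ _ (fun k _ => keyIff source k)
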